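-- pv_equiv track=rewrite | github.com/Nemo-YitongChen/copy_paste_augmentation | copy_paste_project_script.py | segmentation_to_points
-- ===== SOURCE A (Python) =====
-- def segmentation_to_points(segmentation, bias=(0, 0)) -> list:
--     segmentation_points = []
--     for area in segmentation:
--         area_points = []
--         point = []
--         for idx, coord in enumerate(area):
--             if idx % 2 == 0:
--                 point.append(coord - bias[0])
--             if idx % 2 == 1:
--                 point.append(coord - bias[1])
--                 area_points.append(point)
--                 point = []
--         segmentation_points.append(area_points)
--     return segmentation_points
-- ===== SOURCE B (Python) =====
-- def segmentation_to_points(segmentation, bias=(0, 0)) -> list: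
--     segmentation_points = []
--     for area in segmentation:
--         xs = area[::2]
--         ys = area[1::2]
--         segmentation_points.append([[x - bias[0], y - bias[1]] for x, y in zip(xs, ys)])
--     return segmentation_points
-- ===== Notes on version B (the rewrite author's own statement) =====
-- stated objective: idiomatic
-- what changed: Replaces the parity-checked single scan with partial-point state by slicing each area into its even-index and odd-index streams and pairing them with zip (zip truncation drops a dangling odd coordinate).
import Mathlib
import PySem

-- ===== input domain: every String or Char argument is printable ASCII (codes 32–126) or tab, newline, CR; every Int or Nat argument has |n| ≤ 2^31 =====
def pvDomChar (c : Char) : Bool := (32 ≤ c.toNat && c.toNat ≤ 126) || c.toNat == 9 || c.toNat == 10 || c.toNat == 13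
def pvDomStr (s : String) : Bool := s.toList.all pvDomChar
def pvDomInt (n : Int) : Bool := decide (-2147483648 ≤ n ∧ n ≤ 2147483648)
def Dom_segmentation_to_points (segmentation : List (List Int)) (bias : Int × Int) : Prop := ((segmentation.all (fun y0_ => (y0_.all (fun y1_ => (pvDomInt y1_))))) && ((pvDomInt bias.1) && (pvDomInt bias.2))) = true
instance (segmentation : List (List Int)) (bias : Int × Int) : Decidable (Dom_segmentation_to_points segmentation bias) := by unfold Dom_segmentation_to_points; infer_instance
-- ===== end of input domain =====

-- ===== PORT A =====
-- B differs from A only in how each area is traversed; both build the result list front-to-back.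
def segmentation_to_points (segmentation : List (List Int)) (bias : Int × Int) : List (List (List Int)) :=
  segmentation.foldl (fun acc area =>
    let st := (PySem.List.enumerate area 0).foldl
      (fun (st : List (List Int) × List Int) ic =>
        let st1 := if PySem.Int.mod ic.1 2 = 0 then (st.1, st.2 ++ [ic.2 - bias.1]) else st
        if PySem.Int.mod ic.1 2 = 1 then (st1.1 ++ [st1.2 ++ [ic.2 - bias.2]], ([] : List Int)) else st1)
      ([], [])
    acc ++ [st.1]) []

-- ===== PORT B =====
def segmentation_to_points_alt (segmentation : List (List Int)) (bias : Int × Int) : List (List (List Int)) :=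
  segmentation.map (fun area =>
    let xs := (PySem.List.slice? area none none 2).getD []      -- area[::2]; step 2 ≠ 0, never none
    let ys := (PySem.List.slice? area (some 1) none 2).getD []  -- area[1::2]
    (xs.zip ys).map (fun p => [p.1 - bias.1, p.2 - bias.2]))

-- ===== PRECONDITION & SPEC =====
def Spec_segmentation_to_points (segmentation : List (List Int)) (bias : Int × Int) (out : List (List (List Int))) : Prop := out = segmentation_to_points_alt segmentation bias
instance (segmentation : List (List Int)) (bias : Int × Int) (out : List (List (List Int))) : Decidable (Spec_segmentation_to_points segmentation bias out) := by unfold Spec_segmentation_to_points; infer_instance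

-- ===== CLAIM (what is proved, stated in full; the proofs are below) =====
def Claim_equal_segmentation_to_points : Prop := ∀ (segmentation : List (List Int)) (bias : Int × Int), Dom_segmentation_to_points segmentation bias → Spec_segmentation_to_points segmentation bias (segmentation_to_points segmentation bias)

-- ===== LEMMAS AND PROOFS =====

-- consecutive disjoint pairs of a list (a dangling last element is dropped)
def pvPairs : List Int → List (Int × Int)
  | [] => []
  | [_] => []
  | x :: y :: t => (x, y) :: pvPairs t

-- even-index elements
def pvEO : List Int → List Int
  | [] => []
  | [x] => [x]
  | x :: _ :: t => x :: pvEO t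

-- odd-index elements
def pvEO2 : List Int → List Int
  | [] => []
  | [_] => []
  | _ :: y :: t => y :: pvEO2 t

lemma fm0 (x y : Int) (t : List Int) (c : Nat) :
    List.filterMap (fun k : Nat => (x :: y :: t)[(2 * (k:Int)).toNat]?) (List.range (c+1))
    = x :: List.filterMap (fun k : Nat => t[(2 * (k:Int)).toNat]?) (List.range c) := by
  rw [List.range_succ_eq_map]
  simp only [List.filterMap_cons, List.filterMap_map]
  have h0 : ((2 : Int) * ((0:Nat):Int)).toNat = 0 := by omega
  rw [h0]
  simp only [List.getElem?_cons_zero, Function.comp]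
  have hk : ∀ k : Nat, (x :: y :: t)[((2:Int) * ((k+1 : Nat):Int)).toNat]? = t[((2:Int) * (k:Int)).toNat]? := by
    intro k
    have h : ((2:Int) * ((k+1 : Nat):Int)).toNat = ((2:Int) * (k:Int)).toNat + 2 := by push_cast; omega
    rw [h]
    simp [List.getElem?_cons_succ]
  refine congrArg (x :: ·) (List.filterMap_congr (fun k _ => ?_))
  simp only [Nat.succ_eq_add_one]
  exact hk k

lemma fm1 (x y : Int) (t : List Int) (c : Nat) :
    List.filterMap (fun k : Nat => (x :: y :: t)[(1 + 2 * (k:Int)).toNat]?) (List.range (c+1))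
    = y :: List.filterMap (fun k : Nat => t[(1 + 2 * (k:Int)).toNat]?) (List.range c) := by
  rw [List.range_succ_eq_map]
  simp only [List.filterMap_cons, List.filterMap_map]
  have h0 : ((1:Int) + 2 * ((0:Nat):Int)).toNat = 1 := by omega
  rw [h0]
  simp only [List.getElem?_cons_succ, List.getElem?_cons_zero, Function.comp]
  have hk : ∀ k : Nat, (x :: y :: t)[((1:Int) + 2 * ((k+1 : Nat):Int)).toNat]? = t[((1:Int) + 2 * (k:Int)).toNat]? := by
    intro k
    have h : ((1:Int) + 2 * ((k+1 : Nat):Int)).toNat = ((1:Int) + 2 * (k:Int)).toNat + 2 := by push_cast; omega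
    rw [h]
    simp [List.getElem?_cons_succ]
  refine congrArg (y :: ·) (List.filterMap_congr (fun k _ => ?_))
  simp only [Nat.succ_eq_add_one]
  exact hk k

lemma fm_eo : ∀ t : List Int,
    List.filterMap (fun k : Nat => t[(2 * (k:Int)).toNat]?) (List.range ((t.length + 1)/2)) = pvEO t := by
  intro t
  induction t using pvEO.induct with
  | case1 => simp [pvEO]
  | case2 x => simp [pvEO, List.range_one]
  | case3 x y t ih =>
    have hc : ((x :: y :: t).length + 1)/2 = (t.length + 1)/2 + 1 := by simp; omega
    rw [hc, fm0, ih, pvEO]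

lemma fm_eo2 : ∀ t : List Int,
    List.filterMap (fun k : Nat => t[(1 + 2 * (k:Int)).toNat]?) (List.range (t.length/2)) = pvEO2 t := by
  intro t
  induction t using pvEO2.induct with
  | case1 => simp [pvEO2]
  | case2 x => simp [pvEO2]
  | case3 x y t ih =>
    have hc : (x :: y :: t).length/2 = t.length/2 + 1 := by simp; omega
    rw [hc, fm1, ih, pvEO2]

lemma slice?_step_two (xs : List Int) :
    PySem.List.slice? xs none none 2 = some (pvEO xs) := by
  cases xs with
  | nil => simp [PySem.List.slice?, PySem.List.sliceIndices, pvEO]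
  | cons x t =>
    simp only [PySem.List.slice?, PySem.List.sliceIndices]
    norm_num
    have hc : (((t.length : Int) + 1 + 2 - 1)/2).toNat = ((x :: t).length + 1)/2 := by simp; omega
    rw [hc, fm_eo]

lemma slice?_one_step_two (xs : List Int) :
    PySem.List.slice? xs (some 1) none 2 = some (pvEO2 xs) := by
  cases xs with
  | nil => simp [PySem.List.slice?, PySem.List.sliceIndices, pvEO2]
  | cons x t =>
    simp only [PySem.List.slice?, PySem.List.sliceIndices]
    norm_num
    cases t with
    | nil => simp [pvEO2]
    | cons y r =>
      have h1 : 0 < (y :: r).length := by simp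
      rw [if_pos h1]
      have hc : ((((y :: r).length : Int) + 2 - 1)/2).toNat = (x :: y :: r).length/2 := by simp; omega
      rw [hc, fm_eo2]

lemma zip_eo : ∀ xs : List Int, (pvEO xs).zip (pvEO2 xs) = pvPairs xs := by
  intro xs
  induction xs using pvPairs.induct <;> simp [pvEO, pvEO2, pvPairs, *]

lemma foldA (bias : Int × Int) :
    ∀ (area : List Int) (m : Nat) (acc : List (List Int)),
    ((PySem.List.enumerate area (2 * (m : Int))).foldl
      (fun (st : List (List Int) × List Int) ic =>
        let st1 := if PySem.Int.mod ic.1 2 = 0 then (st.1, st.2 ++ [ic.2 - bias.1]) else st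
        if PySem.Int.mod ic.1 2 = 1 then (st1.1 ++ [st1.2 ++ [ic.2 - bias.2]], ([] : List Int)) else st1)
      (acc, [])).1 = acc ++ (pvPairs area).map (fun p => [p.1 - bias.1, p.2 - bias.2]) := by
  intro area
  induction area using pvPairs.induct with
  | case1 => simp [PySem.List.enumerate_nil, pvPairs]
  | case2 x =>
    intro m acc
    simp [PySem.List.enumerate_cons, PySem.List.enumerate_nil, pvPairs, PySem.Int.mod]
  | case3 x y t ih =>
    intro m acc
    have h0 : PySem.Int.mod (2 * (m:Int)) 2 = 0 := by simp [PySem.Int.mod]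
    have h1 : PySem.Int.mod (2 * (m:Int) + 1) 2 = 1 := by simp [PySem.Int.mod]
    simp only [PySem.List.enumerate_cons, List.foldl_cons, h0, h1, reduceIte]
    simp only [show ((1:Int) = 0) = False by simp, show ((0:Int) = 1) = False by simp, if_false]
    simp only [List.nil_append, List.cons_append]
    have harg : (2 * (m:Int)) + 1 + 1 = 2 * ((m:Int) + 1) := by ring
    rw [harg]
    have ih' := ih (m+1) (acc ++ [[x - bias.1, y - bias.2]])
    push_cast at ih'
    rw [ih']
    simp [pvPairs]

-- ===== VERDICT (by name: the statement is the Claim_ definition above) =====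
theorem segmentation_to_points_spec : Claim_equal_segmentation_to_points := by
  intro segmentation bias hdom
  clear hdom
  unfold Spec_segmentation_to_points segmentation_to_points segmentation_to_points_alt
  induction segmentation using List.reverseRecOn with
  | nil => simp
  | append_singleton s area ih =>
    rw [List.foldl_append, List.map_append, ← ih]
    simp only [List.foldl_cons, List.foldl_nil, List.map_cons, List.map_nil]
    have hA := foldA bias area 0 []
    simp only [Nat.cast_zero, mul_zero] at hA
    rw [hA]
    rw [slice?_step_two, slice?_one_step_two]
    simp [zip_eo]
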